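-- pv_equiv track=rewrite | github.com/Zhuifeng414/leetcode | zuoshen_study/classic/Code_01_CordCoverMaxPoint.py | comparator
-- ===== SOURCE A (Python) =====
-- def comparator(arr, length):
--     res = 0
--     for i in range(0, len(arr)):
--         pre = i - 1
--         while pre >= 0 and arr[i] - arr[pre] <= length:
--             pre -= 1
--         res = max(res, i - pre)
--     return res
-- ===== SOURCE B (Python) =====
-- def comparator(arr, length):
--     # Per index i, binary-search the leftmost start k with arr[i] - arr[k] <= length.
--     res = 0
--     for i in range(len(arr)):
--         lo, hi = 0, i
--         while lo < hi:
--             mid = (lo + hi) // 2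
--             if arr[i] - arr[mid] <= length:
--                 hi = mid
--             else:
--                 lo = mid + 1
--         res = max(res, i - lo + 1)
--     return res
-- ===== Notes on version B (the rewrite author's own statement) =====
-- stated objective: faster
-- what changed: Replaced the per-index backward rescanning while-loop (quadratic) by a per-index binary search for the leftmost reachable start; Pre_ admits exactly the arrays on which the reach predicate is monotone per index (all ascending-sorted arrays, the cord-cover problem's intended domain, qualify) and excludes the rest, where A's backward scan yields an accidental value with no meaning for the problem.
-- outside the precondition, e.g. on comparator([0, 1, 0, 0], -1): A returns 2, B returns 3
import Mathlib
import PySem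

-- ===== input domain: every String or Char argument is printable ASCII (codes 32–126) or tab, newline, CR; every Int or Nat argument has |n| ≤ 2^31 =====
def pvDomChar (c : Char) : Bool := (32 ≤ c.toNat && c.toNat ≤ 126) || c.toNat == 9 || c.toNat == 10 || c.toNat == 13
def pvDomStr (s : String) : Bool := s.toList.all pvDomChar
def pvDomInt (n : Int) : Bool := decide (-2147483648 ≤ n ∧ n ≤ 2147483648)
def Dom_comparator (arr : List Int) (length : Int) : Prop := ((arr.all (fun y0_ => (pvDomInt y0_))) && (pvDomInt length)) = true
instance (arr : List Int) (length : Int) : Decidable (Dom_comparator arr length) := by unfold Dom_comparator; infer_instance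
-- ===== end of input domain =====

-- B changes the algorithm: per index a binary search for the leftmost reachable start instead of
-- A's backward rescanning while-loop; equivalence is claimed on the monotone domain (Pre_).

-- ===== PORT A =====
-- inner 'while pre >= 0 and arr[i] - arr[pre] <= length: pre -= 1'
def whileA (arr : List Int) (length i pre : Int) : Int :=
  if h : 0 ≤ pre ∧ PySem.List.pyGetD arr i 0 - PySem.List.pyGetD arr pre 0 ≤ length then
    whileA arr length i (pre - 1)
  else pre
termination_by (pre + 1).toNat
decreasing_by omega

def comparator (arr : List Int) (length : Int) : Int :=
  (PySem.List.pyRange 0 arr.length 1).foldl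
    (fun res i => max res (i - whileA arr length i (i - 1))) 0

-- ===== PORT B =====
-- inner 'while lo < hi: mid = (lo + hi) // 2; if arr[i] - arr[mid] <= length: hi = mid else: lo = mid + 1'
def bsearch (arr : List Int) (length i lo hi : Int) : Int :=
  if h : lo < hi then
    let mid := PySem.Int.floordiv (lo + hi) 2
    if PySem.List.pyGetD arr i 0 - PySem.List.pyGetD arr mid 0 ≤ length then
      bsearch arr length i lo mid
    else
      bsearch arr length i (mid + 1) hi
  else lo
termination_by (hi - lo).toNat
decreasing_by
  · have h2 := (PySem.Int.floordiv_lt_iff_lt_mul (a := lo + hi) (b := 2) (q := hi) (by omega)).2 (by omega)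
    omega
  · have h1 := (PySem.Int.le_floordiv_iff_mul_le (a := lo + hi) (b := 2) (q := lo) (by omega)).2 (by omega)
    omega

def comparator_alt (arr : List Int) (length : Int) : Int :=
  (PySem.List.pyRange 0 arr.length 1).foldl
    (fun res i => max res (i - bsearch arr length i 0 i + 1)) 0

-- ===== PRECONDITION & SPEC =====
-- Pre_ admits exactly the arrays on which, per index i, the reach predicate 'arr[i]-arr[k] <= length'
-- is monotone in the start k (every ascending-sorted array, the cord-cover problem's intended domain,
-- qualifies); on excluded arrays A still returns, but its backward-scan value is an accidental
-- artefact of scanning unsorted input.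
def Pre_comparator (arr : List Int) (length : Int) : Prop :=
  ∀ i < arr.length, ∀ k' < i, ∀ k ≤ k',
    arr.getD i 0 - arr.getD k 0 ≤ length → arr.getD i 0 - arr.getD k' 0 ≤ length
instance (arr : List Int) (length : Int) : Decidable (Pre_comparator arr length) := by unfold Pre_comparator; infer_instance

def pvWitness_comparator : List Int × Int := ([1, 2, 4, 7], 2)

def Spec_comparator (arr : List Int) (length : Int) (out : Int) : Prop := out = comparator_alt arr length
instance (arr : List Int) (length : Int) (out : Int) : Decidable (Spec_comparator arr length out) := by unfold Spec_comparator; infer_instance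

-- ===== CLAIM (what is proved, stated in full; the proofs are below) =====
def Claim_equal_comparator : Prop := ∀ (arr : List Int) (length : Int), Dom_comparator arr length → Pre_comparator arr length → Spec_comparator arr length (comparator arr length)

-- ===== LEMMAS AND PROOFS =====

-- value of arr at an Int index (the ports' own accessor)
def dd (arr : List Int) (k : Int) : Int := PySem.List.pyGetD arr k 0

-- the outer folds, restated as structural recursion on the upper bound
def runA (arr : List Int) (length : Int) : Nat → Int
  | 0 => 0
  | m + 1 => max (runA arr length m) ((m : Int) - whileA arr length m ((m : Int) - 1))

def runB (arr : List Int) (length : Int) : Nat → Int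
  | 0 => 0
  | m + 1 => max (runB arr length m) ((m : Int) - bsearch arr length m 0 m + 1)

theorem foldl_pyRange_nat {α : Type} (f : α → Int → α) (init : α) (n : Nat) :
    (PySem.List.pyRange 0 (n : Int) 1).foldl f init = Nat.rec init (fun m acc => f acc (m : Int)) n := by
  induction n with
  | zero => simp [PySem.List.pyRange]
  | succ m ih =>
      have h : (((m : Int)) + 1) = ((m + 1 : Nat) : Int) := by push_cast; ring
      rw [← h, PySem.List.pyRange_one_succ_right (by positivity), List.foldl_append, ih]
      rfl

theorem comparator_eq_runA (arr : List Int) (length : Int) :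
    comparator arr length = runA arr length arr.length := by
  unfold comparator
  rw [foldl_pyRange_nat]
  induction arr.length with
  | zero => rfl
  | succ m ih => simp only [runA, ← ih]

theorem comparator_alt_eq_runB (arr : List Int) (length : Int) :
    comparator_alt arr length = runB arr length arr.length := by
  unfold comparator_alt
  rw [foldl_pyRange_nat]
  induction arr.length with
  | zero => rfl
  | succ m ih => simp only [runB, ← ih]

theorem dd_eq_getD (arr : List Int) {k : Int} (h0 : 0 ≤ k) (hk : k < (arr.length : Int)) :
    dd arr k = arr.getD k.toNat 0 := by
  rw [dd, PySem.List.pyGetD_eq_getElem arr 0 h0 hk, List.getD_eq_getElem arr 0 (by omega)]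

theorem pre_int (arr : List Int) (length : Int) (h : Pre_comparator arr length) :
    ∀ i k k' : Int, 0 ≤ k → k ≤ k' → k' < i → i < (arr.length : Int) →
      dd arr i - dd arr k ≤ length → dd arr i - dd arr k' ≤ length := by
  intro i k k' h0 hkk hk'i hin hle
  rw [dd_eq_getD arr (by omega) hin, dd_eq_getD arr h0 (by omega)] at hle
  rw [dd_eq_getD arr (by omega) hin, dd_eq_getD arr (by omega) (by omega)]
  exact h i.toNat (by omega) k'.toNat (by omega) k.toNat (by omega) hle

-- characterization of A's inner while-loop
theorem whileA_spec (arr : List Int) (length i : Int) :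
    ∀ (pre : Int), -1 ≤ pre → pre ≤ i - 1 →
    (∀ k : Int, pre < k → k ≤ i - 1 → dd arr i - dd arr k ≤ length) →
    (-1 ≤ whileA arr length i pre ∧ whileA arr length i pre ≤ pre) ∧
    (whileA arr length i pre = -1 ∨ length < dd arr i - dd arr (whileA arr length i pre)) ∧
    (∀ k : Int, whileA arr length i pre < k → k ≤ i - 1 → dd arr i - dd arr k ≤ length) := by
  suffices H : ∀ (n : Nat) (pre : Int), (pre + 1).toNat = n → -1 ≤ pre → pre ≤ i - 1 →
      (∀ k : Int, pre < k → k ≤ i - 1 → dd arr i - dd arr k ≤ length) →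
      (-1 ≤ whileA arr length i pre ∧ whileA arr length i pre ≤ pre) ∧
      (whileA arr length i pre = -1 ∨ length < dd arr i - dd arr (whileA arr length i pre)) ∧
      (∀ k : Int, whileA arr length i pre < k → k ≤ i - 1 → dd arr i - dd arr k ≤ length) by
    exact fun pre h1 h2 h3 => H _ pre rfl h1 h2 h3
  intro n
  induction n with
  | zero =>
      intro pre hn h1 h2 h3
      have hpe : pre = -1 := by omega
      subst hpe
      rw [whileA]
      simp only [show ¬(0 ≤ (-1 : Int) ∧ PySem.List.pyGetD arr i 0 - PySem.List.pyGetD arr (-1) 0 ≤ length) from by omega, dite_false]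
      exact ⟨⟨le_rfl, le_rfl⟩, by simp, h3⟩
  | succ m ih =>
      intro pre hn h1 h2 h3
      rw [whileA]
      split_ifs with hc
      · have h3' : ∀ k : Int, pre - 1 < k → k ≤ i - 1 → dd arr i - dd arr k ≤ length := by
          intro k hk1 hk2
          rcases eq_or_lt_of_le (show pre ≤ k from by omega) with he | hlt
          · rw [← he]; exact hc.2
          · exact h3 k hlt hk2
        have := ih (pre - 1) (by omega) (by omega) (by omega) h3'
        exact ⟨⟨this.1.1, by omega⟩, this.2.1, this.2.2⟩
      · refine ⟨⟨h1, le_rfl⟩, ?_, h3⟩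
        rcases eq_or_lt_of_le h1 with he | hlt
        · exact Or.inl he.symm
        · right
          have : ¬ (dd arr i - dd arr pre ≤ length) := fun hle => hc ⟨by omega, hle⟩
          omega

-- characterization of B's binary search (under per-index monotonicity of the reach predicate)
theorem bsearch_spec (arr : List Int) (length i : Int)
    (hmono : ∀ k k' : Int, 0 ≤ k → k ≤ k' → k' < i → dd arr i - dd arr k ≤ length →
      dd arr i - dd arr k' ≤ length) :
    ∀ (lo hi : Int), 0 ≤ lo → lo ≤ hi → hi ≤ i →
    (∀ k : Int, 0 ≤ k → k < lo → length < dd arr i - dd arr k) →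
    (∀ k : Int, hi ≤ k → k < i → dd arr i - dd arr k ≤ length) →
    (0 ≤ bsearch arr length i lo hi ∧ bsearch arr length i lo hi ≤ i) ∧
    (∀ k : Int, 0 ≤ k → k < bsearch arr length i lo hi → length < dd arr i - dd arr k) ∧
    (∀ k : Int, bsearch arr length i lo hi ≤ k → k < i → dd arr i - dd arr k ≤ length) := by
  suffices H : ∀ (n : Nat) (lo hi : Int), (hi - lo).toNat ≤ n → 0 ≤ lo → lo ≤ hi → hi ≤ i →
      (∀ k : Int, 0 ≤ k → k < lo → length < dd arr i - dd arr k) →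
      (∀ k : Int, hi ≤ k → k < i → dd arr i - dd arr k ≤ length) →
      (0 ≤ bsearch arr length i lo hi ∧ bsearch arr length i lo hi ≤ i) ∧
      (∀ k : Int, 0 ≤ k → k < bsearch arr length i lo hi → length < dd arr i - dd arr k) ∧
      (∀ k : Int, bsearch arr length i lo hi ≤ k → k < i → dd arr i - dd arr k ≤ length) by
    exact fun lo hi h1 h2 h3 h4 h5 => H ((hi - lo).toNat) lo hi le_rfl h1 h2 h3 h4 h5
  intro n
  induction n with
  | zero =>
      intro lo hi hn h0 hlh hhi hlow hhigh
      have he : lo = hi := by omega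
      rw [bsearch]
      simp only [show ¬ lo < hi from by omega, dite_false]
      exact ⟨⟨h0, by omega⟩, hlow, fun k hk1 hk2 => hhigh k (by omega) hk2⟩
  | succ m ih =>
      intro lo hi hn h0 hlh hhi hlow hhigh
      rcases lt_or_ge lo hi with hlt | hge
      · have hm1 : lo ≤ PySem.Int.floordiv (lo + hi) 2 :=
          (PySem.Int.le_floordiv_iff_mul_le (by omega)).2 (by omega)
        have hm2 : PySem.Int.floordiv (lo + hi) 2 < hi :=
          (PySem.Int.floordiv_lt_iff_lt_mul (by omega)).2 (by omega)
        rw [bsearch]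
        simp only [hlt, dite_true]
        split_ifs with hc
        · -- arr[i] - arr[mid] <= length : hi := mid
          have hhigh' : ∀ k : Int, PySem.Int.floordiv (lo + hi) 2 ≤ k → k < i → dd arr i - dd arr k ≤ length :=
            fun k hk1 hk2 => hmono (PySem.Int.floordiv (lo + hi) 2) k (by omega) hk1 hk2 hc
          exact ih lo (PySem.Int.floordiv (lo + hi) 2) (by omega) h0 (by omega) (by omega) hlow hhigh'
        · -- length < arr[i] - arr[mid] : lo := mid + 1
          have hlow' : ∀ k : Int, 0 ≤ k → k < PySem.Int.floordiv (lo + hi) 2 + 1 → length < dd arr i - dd arr k := by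
            intro k hk1 hk2
            by_contra hnot
            exact hc (hmono k (PySem.Int.floordiv (lo + hi) 2) hk1 (by omega) (by omega) (by omega))
          exact ih (PySem.Int.floordiv (lo + hi) 2 + 1) hi (by omega) (by omega) (by omega) hhi hlow' hhigh
      · rw [bsearch]
        simp only [show ¬ lo < hi from by omega, dite_false]
        exact ⟨⟨h0, by omega⟩, hlow, fun k hk1 hk2 => hhigh k (by omega) hk2⟩

-- on the monotone domain the two inner loops stop one apart
theorem stops_agree (arr : List Int) (length : Int)
    (i : Int) (hi : 0 ≤ i)
    (hmono : ∀ k k' : Int, 0 ≤ k → k ≤ k' → k' < i → dd arr i - dd arr k ≤ length →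
      dd arr i - dd arr k' ≤ length) :
    bsearch arr length i 0 i = whileA arr length i (i - 1) + 1 := by
  obtain ⟨⟨hp1, hp2⟩, hpstop, hpup⟩ :=
    whileA_spec arr length i (i - 1) (by omega) le_rfl (fun k hk1 hk2 => by omega)
  obtain ⟨⟨hq1, hq2⟩, hqlo, hqup⟩ :=
    bsearch_spec arr length i hmono 0 i le_rfl hi le_rfl
      (fun k hk1 hk2 => by omega) (fun k hk1 hk2 => by omega)
  set p := whileA arr length i (i - 1) with hp
  set q := bsearch arr length i 0 i with hq
  by_contra hne
  rcases lt_or_gt_of_ne hne with hlt | hgt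
  · -- q ≤ p : p is in [q, i), so reachable, contradicting A's stop condition
    have h1 : dd arr i - dd arr p ≤ length := hqup p (by omega) (by omega)
    have h2 : length < dd arr i - dd arr p := by
      rcases hpstop with he | hgt2
      · omega
      · exact hgt2
    omega
  · -- q ≥ p + 2 : the element p + 1 is judged both ways
    have h1 : length < dd arr i - dd arr (p + 1) := hqlo (p + 1) (by omega) (by omega)
    have h2 : dd arr i - dd arr (p + 1) ≤ length := hpup (p + 1) (by omega) (by omega)
    omega

-- main induction: the two folds agree index by index
theorem run_eq (arr : List Int) (length : Int) (hpre : Pre_comparator arr length) (m : Nat)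
    (hm : m ≤ arr.length) : runB arr length m = runA arr length m := by
  induction m with
  | zero => rfl
  | succ m ih =>
      have hmn : (m : Int) < (arr.length : Int) := by exact_mod_cast hm
      have hsa := stops_agree arr length (m : Int) (by positivity)
        (fun k k' h0 hkk hk'i hle => pre_int arr length hpre (m : Int) k k' h0 hkk hk'i hmn hle)
      show max (runB arr length m) ((m : Int) - bsearch arr length (m : Int) 0 (m : Int) + 1)
        = max (runA arr length m) ((m : Int) - whileA arr length (m : Int) ((m : Int) - 1))
      rw [ih (by omega), hsa]
      ring_nf

-- ===== VERDICT (by name: the statement is the Claim_ definition above) =====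
theorem comparator_spec : Claim_equal_comparator := by
  intro arr length _ hpre
  show comparator arr length = comparator_alt arr length
  rw [comparator_eq_runA, comparator_alt_eq_runB]
  exact (run_eq arr length hpre arr.length le_rfl).symm
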